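-- pv_equiv track=rewrite | github.com/facebookresearch/latent-treelstm | listops/data_preprocessing/ListOpsDatasetTrees.py | _convert
-- ===== SOURCE A (Python) =====
-- def _convert(sr_tree):
--     merge_tree = []
--     idx = -1
--     for e in sr_tree:
--         if e == 0:
--             idx += 1
--         else:
--             idx -= 1
--             merge_tree.append(idx)
--     return merge_tree
-- ===== SOURCE B (Python) =====
-- def _convert(sr_tree):
--     # build the prefix-balance table: balances[k] = running index after k tokens
--     balances = [-1]
--     for e in sr_tree:
--         balances.append(balances[-1] + (1 if e == 0 else -1))
--     # each reduce (non-zero token) contributes the balance just after it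
--     return [balances[i + 1] for i, e in enumerate(sr_tree) if e != 0]
-- ===== Notes on version B (the rewrite author's own statement) =====
-- stated objective: alternative
-- what changed: Replaces the inline running counter with a two-pass build-table-then-filter decomposition: first compute the prefix-balance list, then select the after-balance of each non-zero (reduce) token.
import Mathlib
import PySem

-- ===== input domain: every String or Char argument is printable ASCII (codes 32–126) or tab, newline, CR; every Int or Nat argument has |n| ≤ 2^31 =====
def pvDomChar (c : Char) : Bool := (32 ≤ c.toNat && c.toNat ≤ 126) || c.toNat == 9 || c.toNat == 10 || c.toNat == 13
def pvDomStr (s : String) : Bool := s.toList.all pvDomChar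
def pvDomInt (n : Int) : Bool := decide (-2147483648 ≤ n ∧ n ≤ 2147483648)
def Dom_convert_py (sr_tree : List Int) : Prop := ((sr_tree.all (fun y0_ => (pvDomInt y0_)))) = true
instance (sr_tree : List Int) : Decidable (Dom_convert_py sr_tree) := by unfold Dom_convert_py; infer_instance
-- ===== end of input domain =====

-- B replaces A's inline running counter with a two-pass build-balance-table-then-filter decomposition (alternative, same cost).


-- ===== PORT A =====
-- A's loop: running counter idx, appending idx after each decrement
def convertLoop : List Int → Int → List Int → List Int
  | [], _, merge_tree => merge_tree
  | e :: rest, idx, merge_tree =>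
    if e == 0 then convertLoop rest (idx + 1) merge_tree
    else convertLoop rest (idx - 1) (merge_tree ++ [idx - 1])

def convert_py (sr_tree : List Int) : List Int := convertLoop sr_tree (-1) []

-- ===== PORT B =====
-- B's first pass: balances[i+1] for each i, i.e. the running balance after each token
def pyBalances (idx : Int) : List Int → List Int
  | [] => []
  | e :: rest =>
    let idx' := idx + (if e == 0 then 1 else -1)
    idx' :: pyBalances idx' rest

-- B's second pass: keep the after-balance of each non-zero token
def convert_py_alt (sr_tree : List Int) : List Int :=
  ((sr_tree.zip (pyBalances (-1) sr_tree)).filter (fun p => decide (p.1 ≠ 0))).map Prod.snd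

-- ===== PRECONDITION & SPEC =====
def Spec_convert_py (sr_tree : List Int) (out : List Int) : Prop := out = convert_py_alt sr_tree
instance (sr_tree : List Int) (out : List Int) : Decidable (Spec_convert_py sr_tree out) := by unfold Spec_convert_py; infer_instance

-- ===== CLAIM (what is proved, stated in full; the proofs are below) =====
def Claim_equal_convert_py : Prop := ∀ (sr_tree : List Int), Dom_convert_py sr_tree → Spec_convert_py sr_tree (convert_py sr_tree)

-- ===== LEMMAS AND PROOFS =====
theorem convertLoop_eq (l : List Int) : ∀ (idx : Int) (acc : List Int),
    convertLoop l idx acc =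
      acc ++ ((l.zip (pyBalances idx l)).filter (fun p => decide (p.1 ≠ 0))).map Prod.snd := by
  induction l with
  | nil => intro idx acc; simp [convertLoop, pyBalances]
  | cons e rest ih =>
    intro idx acc
    by_cases h : e = 0
    · simp [convertLoop, pyBalances, h, ih]
    · simp [convertLoop, pyBalances, h, ih]
      constructor <;> [omega; rw [show idx + -1 = idx - 1 by omega]]

-- ===== VERDICT (by name: the statement is the Claim_ definition above) =====
theorem convert_py_spec : Claim_equal_convert_py := by
  intro sr_tree _
  show convert_py sr_tree = convert_py_alt sr_tree
  simp [convert_py, convert_py_alt, convertLoop_eq]
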